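-- pv_equiv track=rewrite | github.com/maswin/leet-code-practice | base_7.py | convertToBase7
-- ===== SOURCE A (Python) =====
-- def convertToBase7(num):
--     """
--     :type num: int
--     :rtype: str
--     """
--     if num == 0:
--         return "0"
--     ans = ""
--     is_negative = num < 0
--     if is_negative:
--         num = num * -1
--     while num != 0:
--         ans = str(num % 7) + ans
--         num = num // 7
--     return "-" + ans if is_negative else ans
-- ===== SOURCE B (Python) =====
-- def convertToBase7(num):
--     """
--     :type num: int
--     :rtype: str
--     """
--     if num < 0:
--         return "-" + convertToBase7(-num)
--     if num < 7:
--         return str(num)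
--     return convertToBase7(num // 7) + str(num % 7)
-- ===== Notes on version B (the rewrite author's own statement) =====
-- stated objective: simpler
-- what changed: Replaces the explicit while-loop building the digit string front-to-back in an accumulator (with a separate zero case and a negation flag) by a direct structural recursion on the quotient: single-digit numbers (including zero) are the base case, negatives recurse once through a '-' prefix.
import Mathlib
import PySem

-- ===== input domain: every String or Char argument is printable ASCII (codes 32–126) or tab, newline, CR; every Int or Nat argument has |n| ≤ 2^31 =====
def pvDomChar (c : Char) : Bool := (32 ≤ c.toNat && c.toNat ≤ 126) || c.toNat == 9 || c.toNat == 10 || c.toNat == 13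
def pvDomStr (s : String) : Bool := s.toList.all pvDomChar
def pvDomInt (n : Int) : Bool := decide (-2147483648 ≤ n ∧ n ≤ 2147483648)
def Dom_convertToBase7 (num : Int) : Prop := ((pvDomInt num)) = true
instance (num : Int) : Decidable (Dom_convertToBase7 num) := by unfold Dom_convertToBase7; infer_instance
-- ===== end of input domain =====

-- B replaces A's while-loop with a front accumulator (plus zero case and negation flag)
-- by a direct recursion on the quotient; string building is done on List Char (Lean's
-- String.append is kernel-opaque) and wrapped with String.ofList at the end.

-- ===== PORT A =====
-- the while loop: ans = str(num % 7) + ans; num = num // 7   (loop is only entered with num > 0;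
-- the guard 'num ≤ 0' instead of 'num = 0' is a totality guard only)
def aLoop (num : Int) (ans : List Char) : List Char :=
  if num ≤ 0 then ans
  else aLoop (PySem.Int.floordiv num 7) (PySem.Int.toChars (PySem.Int.mod num 7) ++ ans)
termination_by num.toNat
decreasing_by
  simp only [PySem.Int.floordiv_eq_ediv_of_pos (by omega : (0:Int) < 7)]
  omega

def convertToBase7 (num : Int) : String :=
  if num = 0 then "0"
  else
    let isNegative := num < 0
    let num' := if isNegative then num * (-1) else num
    let ans := aLoop num' []
    String.ofList (if isNegative then '-' :: ans else ans)

-- ===== PORT B =====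
def bChars (num : Int) : List Char :=
  if num < 0 then '-' :: bChars (-num)
  else if num < 7 then PySem.Int.toChars num
  else bChars (PySem.Int.floordiv num 7) ++ PySem.Int.toChars (PySem.Int.mod num 7)
termination_by 2 * num.natAbs + (if num < 0 then 1 else 0)
decreasing_by
  · simp only [Int.natAbs_neg]
    split_ifs <;> omega
  · simp only [PySem.Int.floordiv_eq_ediv_of_pos (by omega : (0:Int) < 7)]
    split <;> omega

def convertToBase7_alt (num : Int) : String := String.ofList (bChars num)

-- ===== PRECONDITION & SPEC =====
def Spec_convertToBase7 (num : Int) (out : String) : Prop := out = convertToBase7_alt num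
instance (num : Int) (out : String) : Decidable (Spec_convertToBase7 num out) := by unfold Spec_convertToBase7; infer_instance

-- ===== CLAIM (what is proved, stated in full; the proofs are below) =====
def Claim_equal_convertToBase7 : Prop := ∀ (num : Int), Dom_convertToBase7 num → Spec_convertToBase7 num (convertToBase7 num)

-- ===== LEMMAS AND PROOFS =====

lemma aLoop_eq_bChars : ∀ (m : Nat) (n : Int), 0 < n → n.toNat ≤ m →
    ∀ ans, aLoop n ans = bChars n ++ ans := by
  intro m
  induction m with
  | zero => intro n hn hle; omega
  | succ m ih =>
    intro n hn hle ans
    rw [aLoop, bChars]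
    have h7 : PySem.Int.floordiv n 7 = n / 7 :=
      PySem.Int.floordiv_eq_ediv_of_pos (by omega)
    have hm : PySem.Int.mod n 7 = n % 7 :=
      PySem.Int.mod_eq_emod_of_pos (by omega)
    simp only [h7, hm, if_neg (by omega : ¬ n ≤ 0), if_neg (by omega : ¬ n < 0)]
    by_cases hsmall : n < 7
    · have hq : n / 7 = 0 := by omega
      have hmod : n % 7 = n := by omega
      rw [aLoop]
      simp [hq, hmod, hsmall]
    · have hqpos : 0 < n / 7 := by omega
      have hqle : (n / 7).toNat ≤ m := by omega
      rw [ih (n / 7) hqpos hqle]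
      simp [hsmall, List.append_assoc]

-- ===== VERDICT (by name: the statement is the Claim_ definition above) =====
theorem convertToBase7_spec : Claim_equal_convertToBase7 := by
  intro num _
  unfold Spec_convertToBase7 convertToBase7 convertToBase7_alt
  by_cases h0 : num = 0
  · subst h0
    rw [show bChars 0 = ['0'] by rw [bChars]; decide]
    rfl
  · simp only [if_neg h0]
    by_cases hneg : num < 0
    · rw [bChars]
      have h : aLoop (-num) [] = bChars (-num) ++ [] :=
        aLoop_eq_bChars (-num).toNat (-num) (by omega) (by omega) []
      simp [hneg, show num * (-1) = -num by ring, h]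
    · have := aLoop_eq_bChars num.toNat num (by omega) (by omega) []
      simp [hneg, this]
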